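-- pv_equiv track=rewrite | github.com/simonpf/ipwgml | src/ipwgml/tiling.py | get_starts_and_clips
-- ===== SOURCE A (Python) =====
-- from typing import List, Optional, Tuple, Union
--
-- def get_starts_and_clips(
--         extent: int,
--         tile_size: int,
--         overlap: int
-- ) -> Tuple[List[int], List[int]]:
--     """
--     Calculate start indices and numbers of clipped pixels for a given
--     side length, tile size and overlap.
--
--     Args:
--         extent: The extent of the dimension to tile.
--         tile_size: The size of each tile.
--         overlap: The number of pixels of overlap.
--         soft_end: Allow the last tile to go beyond ``n``, see notes for details
--
--     Return:
--         A tuple ``(start, clip)`` containing the start indices of each tile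
--         and the number of pixels to clip between each neighboring tiles.
--     """
--     starts = []
--     clips = []
--     start = 0
--     while start + tile_size < extent:
--         starts.append(start)
--         if start > 0:
--             clips.append(overlap // 2)
--         start = start + tile_size - overlap
--     starts.append(max(extent - tile_size, 0))
--     if len(starts) > 1:
--         clips.append((starts[-2] + tile_size - starts[-1]) // 2)
--     return starts, clips
-- ===== SOURCE B (Python) =====
-- def get_starts_and_clips(extent, tile_size, overlap):
--     step = tile_size - overlap
--     e = extent - tile_size
--     n = (e - 1) // step + 1 if step > 0 and e > 0 else 0
--     starts = [k * step for k in range(n)] + [max(e, 0)]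
--     clips = [overlap // 2] * max(n - 1, 0)
--     if n >= 1:
--         clips.append(((n - 1) * step + tile_size - e) // 2)
--     return starts, clips
-- ===== Notes on version B (the rewrite author's own statement) =====
-- stated objective: alternative
-- what changed: Replaces A's accumulate-in-a-while-loop with a closed-form tile count n = ceil((extent-tile_size)/(tile_size-overlap)), building the start list and clip list directly; Pre_ excludes only the inputs (stride <= 0 with extent > tile_size) on which A's loop never terminates.
-- outside the precondition, e.g. on get_starts_and_clips(10, 4, 4): A does not finish within the time limit, B returns ([6], [])
import Mathlib
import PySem

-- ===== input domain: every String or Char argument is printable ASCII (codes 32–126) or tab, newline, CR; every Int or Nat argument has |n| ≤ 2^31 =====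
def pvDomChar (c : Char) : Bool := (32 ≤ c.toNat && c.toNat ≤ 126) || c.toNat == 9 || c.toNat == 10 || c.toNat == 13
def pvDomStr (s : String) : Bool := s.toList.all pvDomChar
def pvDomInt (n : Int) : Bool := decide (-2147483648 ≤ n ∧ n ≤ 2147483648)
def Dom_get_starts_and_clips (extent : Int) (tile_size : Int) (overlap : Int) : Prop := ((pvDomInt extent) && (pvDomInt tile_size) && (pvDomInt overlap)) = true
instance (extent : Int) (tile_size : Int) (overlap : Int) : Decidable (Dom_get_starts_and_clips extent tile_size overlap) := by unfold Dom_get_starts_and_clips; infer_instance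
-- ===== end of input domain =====

-- B replaces A's while-loop by a closed-form tile count n and direct list constructions
-- (objective: alternative decomposition, same asymptotic cost).
-- Pre_ excludes exactly the inputs on which A's while-loop never terminates.

-- ===== PORT A =====
-- A's while-loop. The '0 < tile_size - overlap' conjunct in the guard only makes the
-- recursion total in Lean: whenever it differs from Python's guard, Python's loop diverges
-- (those inputs are outside Pre_).
def pvALoop (extent tile_size overlap start : Int) (starts clips : List Int) :
    List Int × List Int :=
  if _h : start + tile_size < extent ∧ 0 < tile_size - overlap then
    pvALoop extent tile_size overlap (start + tile_size - overlap)
      (starts ++ [start])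
      (if 0 < start then clips ++ [PySem.Int.floordiv overlap 2] else clips)
  else (starts, clips)
termination_by (extent - tile_size - start).toNat
decreasing_by omega

def get_starts_and_clips (extent : Int) (tile_size : Int) (overlap : Int) : List Int × List Int :=
  let p := pvALoop extent tile_size overlap 0 [] []
  let starts := p.1 ++ [max (extent - tile_size) 0]
  if 1 < starts.length then
    -- starts[-2], starts[-1]: negative indices are in range because len(starts) > 1
    (starts, p.2 ++ [PySem.Int.floordiv
      (PySem.List.pyGetD starts (-2) 0 + tile_size - PySem.List.pyGetD starts (-1) 0) 2])
  else (starts, p.2)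

-- ===== PORT B =====
def get_starts_and_clips_alt (extent : Int) (tile_size : Int) (overlap : Int) : List Int × List Int :=
  let step := tile_size - overlap
  let e := extent - tile_size
  let n : Int := if 0 < step ∧ 0 < e then PySem.Int.floordiv (e - 1) step + 1 else 0
  let starts := (PySem.List.pyRange 0 n 1).map (fun k => k * step) ++ [max e 0]
  let clips := List.replicate (max (n - 1) 0).toNat (PySem.Int.floordiv overlap 2)
  if 1 ≤ n then
    (starts, clips ++ [PySem.Int.floordiv ((n - 1) * step + tile_size - e) 2])
  else (starts, clips)

-- ===== PRECONDITION & SPEC =====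
-- Pre_ excludes exactly the inputs on which A never returns: when the stride
-- tile_size - overlap is ≤ 0 and the loop is entered at all, A loops forever.
def Pre_get_starts_and_clips (extent : Int) (tile_size : Int) (overlap : Int) : Prop :=
  0 < tile_size - overlap ∨ extent ≤ tile_size
instance (extent : Int) (tile_size : Int) (overlap : Int) : Decidable (Pre_get_starts_and_clips extent tile_size overlap) := by unfold Pre_get_starts_and_clips; infer_instance

def pvWitness_get_starts_and_clips : Int × Int × Int := (10, 4, 1)

def Spec_get_starts_and_clips (extent : Int) (tile_size : Int) (overlap : Int) (out : List Int × List Int) : Prop := out = get_starts_and_clips_alt extent tile_size overlap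
instance (extent : Int) (tile_size : Int) (overlap : Int) (out : List Int × List Int) : Decidable (Spec_get_starts_and_clips extent tile_size overlap out) := by unfold Spec_get_starts_and_clips; infer_instance

-- ===== CLAIM (what is proved, stated in full; the proofs are below) =====
def Claim_equal_get_starts_and_clips : Prop := ∀ (extent : Int) (tile_size : Int) (overlap : Int), Dom_get_starts_and_clips extent tile_size overlap → Pre_get_starts_and_clips extent tile_size overlap → Spec_get_starts_and_clips extent tile_size overlap (get_starts_and_clips extent tile_size overlap)

-- ===== LEMMAS AND PROOFS =====

-- Loop characterisation for a positive start: exactly m more iterations happen,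
-- each appending its start index and one clip.
lemma pvALoop_char (extent ts ov : Int) (m : Nat) :
    ∀ (s : Int) (A C : List Int), 0 < ts - ov → 0 < s →
    extent ≤ s + (m : Int) * (ts - ov) + ts →
    (∀ k : Nat, k < m → s + (k : Int) * (ts - ov) + ts < extent) →
    pvALoop extent ts ov s A C =
      (A ++ (List.range m).map (fun k : Nat => s + (k : Int) * (ts - ov)),
       C ++ List.replicate m (PySem.Int.floordiv ov 2)) := by
  induction m with
  | zero =>
    intro s A C hstep hs hub _
    simp only [Nat.cast_zero, zero_mul, add_zero] at hub
    rw [pvALoop, dif_neg (by omega : ¬ (s + ts < extent ∧ 0 < ts - ov))]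
    simp
  | succ m ih =>
    intro s A C hstep hs hub hlt
    have h0 : s + ts < extent := by
      have := hlt 0 (Nat.succ_pos m); simpa using this
    rw [pvALoop]
    rw [dif_pos ⟨h0, hstep⟩, if_pos hs]
    rw [ih (s + ts - ov) (A ++ [s]) (C ++ [PySem.Int.floordiv ov 2]) hstep (by omega)
      (by push_cast at hub ⊢; linarith)
      (by intro k hk
          have := hlt (k + 1) (by omega)
          push_cast at this ⊢; linarith)]
    refine congrArg₂ Prod.mk ?_ ?_
    · rw [List.range_succ_eq_map]
      simp only [List.map_cons, List.map_map, List.append_assoc, List.singleton_append,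
        Nat.cast_zero, zero_mul, add_zero]
      congr 2
      apply List.map_congr_left
      intro k _
      simp only [Function.comp]
      push_cast; ring
    · simp [List.replicate_succ]

-- last-two-element lookups with Python's negative indices
lemma pyGetD_append_pair_neg_one (ys : List Int) (a b d : Int) :
    PySem.List.pyGetD (ys ++ [a, b]) (-1) d = b := by
  simp [PySem.List.pyGetD, PySem.List.pyGet?, PySem.List.pyIdx?]

lemma pyGetD_append_pair_neg_two (ys : List Int) (a b d : Int) :
    PySem.List.pyGetD (ys ++ [a, b]) (-2) d = a := by
  simp [PySem.List.pyGetD, PySem.List.pyGet?, PySem.List.pyIdx?]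

-- the common closed normal form both ports reduce to when the loop runs
def pvNF (extent ts ov : Int) (m : Nat) : List Int × List Int :=
  (0 :: (List.range m).map (fun k : Nat => (ts - ov) + (k : Int) * (ts - ov)) ++ [extent - ts],
   List.replicate m (PySem.Int.floordiv ov 2) ++
     [PySem.Int.floordiv ((m : Int) * (ts - ov) + ts - (extent - ts)) 2])

lemma main_case (extent ts ov : Int) (hstep : 0 < ts - ov) (he : ts < extent) :
    get_starts_and_clips extent ts ov = get_starts_and_clips_alt extent ts ov := by
  have hq0 : 0 ≤ (extent - ts - 1) / (ts - ov) :=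
    Int.ediv_nonneg (by omega) (by omega)
  set q := (extent - ts - 1) / (ts - ov) with hqdef
  have hid : (ts - ov) * q + (extent - ts - 1) % (ts - ov) = extent - ts - 1 :=
    Int.ediv_add_emod _ _
  have hr0 : 0 ≤ (extent - ts - 1) % (ts - ov) := Int.emod_nonneg _ (by omega)
  have hrlt : (extent - ts - 1) % (ts - ov) < ts - ov := Int.emod_lt_of_pos _ hstep
  set m := q.toNat with hm
  have hqm : (m : Int) = q := Int.toNat_of_nonneg hq0
  have hA : get_starts_and_clips extent ts ov = pvNF extent ts ov m := by
    unfold get_starts_and_clips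
    rw [pvALoop, dif_pos ⟨by omega, hstep⟩, if_neg (lt_irrefl 0)]
    rw [pvALoop_char extent ts ov m (0 + ts - ov) ([] ++ [0]) [] hstep (by omega)
      (by rw [hqm]; nlinarith)
      (by intro k hk
          have hk' : (k : Int) + 1 ≤ q := by omega
          have : ((k : Int) + 1) * (ts - ov) ≤ q * (ts - ov) :=
            mul_le_mul_of_nonneg_right hk' (le_of_lt hstep)
          nlinarith)]
    simp only [List.nil_append, List.singleton_append, zero_add]
    have hlen : 1 < ((0 :: (List.range m).map (fun k : Nat => ts - ov + (k : Int) * (ts - ov))) ++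
        [max (extent - ts) 0]).length := by
      simp
    rw [if_pos hlen]
    have hmax : max (extent - ts) 0 = extent - ts := by omega
    cases m with
    | zero =>
      simp only [List.range_zero, List.map_nil, List.cons_append, List.nil_append, hmax]
      rw [show (0 : Int) :: [extent - ts] = [] ++ [(0 : Int), extent - ts] from rfl,
        pyGetD_append_pair_neg_one, pyGetD_append_pair_neg_two]
      unfold pvNF
      norm_num
    | succ m' =>
      rw [List.range_succ, List.map_append]
      simp only [List.map_cons, List.map_nil, hmax]
      rw [show (0 : Int) :: ((List.range m').map (fun k : Nat => ts - ov + (k : Int) * (ts - ov)) ++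
            [ts - ov + (m' : Int) * (ts - ov)]) ++ [extent - ts]
          = ((0 : Int) :: (List.range m').map (fun k : Nat => ts - ov + (k : Int) * (ts - ov))) ++
            [ts - ov + (m' : Int) * (ts - ov), extent - ts] by simp,
        pyGetD_append_pair_neg_one, pyGetD_append_pair_neg_two]
      unfold pvNF
      rw [List.range_succ, List.map_append]
      refine congrArg₂ Prod.mk ?_ ?_
      · simp [List.append_assoc]
      · congr 2
        push_cast; ring
  have hB : get_starts_and_clips_alt extent ts ov = pvNF extent ts ov m := by
    unfold get_starts_and_clips_alt
    simp only [if_pos (show 0 < ts - ov ∧ 0 < extent - ts from ⟨hstep, by omega⟩)]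
    rw [PySem.Int.floordiv_eq_ediv_of_pos hstep, ← hqdef]
    simp only [if_pos (show (1 : Int) ≤ q + 1 from by omega)]
    have hmax : max (extent - ts) 0 = extent - ts := by omega
    have hmax1 : max (q + 1 - 1) 0 = (m : Int) := by omega
    have hrange : PySem.List.pyRange 0 (q + 1) 1 =
        (List.range (m + 1)).map (fun k : Nat => (0 : Int) + (k : Int)) := by
      rw [PySem.List.pyRange_one]
      congr 2
      omega
    rw [hrange, hmax, hmax1, Int.toNat_natCast]
    unfold pvNF
    refine congrArg₂ Prod.mk ?_ ?_
    · rw [List.map_map, List.range_succ_eq_map]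
      simp only [List.map_cons, List.map_map, Function.comp, Nat.cast_zero, add_zero,
        zero_add, zero_mul, List.cons_append]
      congr 2
      apply List.map_congr_left; intro k _
      simp only [Function.comp_apply]
      push_cast; ring
    · rw [show q + 1 - 1 = (m : Int) from by omega]
  rw [hA, hB]

-- ===== VERDICT (by name: the statement is the Claim_ definition above) =====
theorem get_starts_and_clips_spec : Claim_equal_get_starts_and_clips := by
  intro extent ts ov _ hpre
  unfold Spec_get_starts_and_clips
  by_cases he : extent ≤ ts
  · -- the loop body never runs on either side
    have h2 : ¬ (0 < ts - ov ∧ 0 < extent - ts) := by omega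
    unfold get_starts_and_clips get_starts_and_clips_alt
    rw [pvALoop, dif_neg (by omega : ¬ (0 + ts < extent ∧ 0 < ts - ov))]
    simp only [if_neg h2]
    norm_num [PySem.List.pyRange_one_eq_nil (le_refl (0 : Int))]
  · exact main_case extent ts ov (by rcases hpre with h | h; exacts [h, absurd h he]) (by omega)
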